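-- pv_equiv track=rewrite | github.com/oguzmes/StochasticAntibiotic | ABR.py | findMaxLayerSize
-- ===== SOURCE A (Python) =====
-- def findMaxLayerSize(data):
--     layer_sums = {}
--
--     for key, value in data.items():
--         layer = key.split('_')[1]
--
--         if layer in layer_sums:
--             layer_sums[layer] += value
--         else:
--             layer_sums[layer] = value
--
--     max_layer = max(layer_sums, key=layer_sums.get)
--
--     layer_sums[max_layer]
--     return layer_sums[max_layer]
-- ===== SOURCE B (Python) =====
-- def findMaxLayerSize(data):
--     layers = {key.split('_')[1] for key in data}
--     return max(sum(value for key, value in data.items()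
--                    if key.split('_')[1] == layer)
--                for layer in layers)
-- ===== Notes on version B (the rewrite author's own statement) =====
-- stated objective: simpler
-- what changed: Replaces A's incremental dict aggregation plus keyed max over dict keys by a two-liner: a set comprehension of the distinct layers, a per-layer rescan summing matching values, and a plain max over those sums.
-- outside the precondition, e.g. on findMaxLayerSize({}): A raises ValueError, B raises ValueError
import Mathlib
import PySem

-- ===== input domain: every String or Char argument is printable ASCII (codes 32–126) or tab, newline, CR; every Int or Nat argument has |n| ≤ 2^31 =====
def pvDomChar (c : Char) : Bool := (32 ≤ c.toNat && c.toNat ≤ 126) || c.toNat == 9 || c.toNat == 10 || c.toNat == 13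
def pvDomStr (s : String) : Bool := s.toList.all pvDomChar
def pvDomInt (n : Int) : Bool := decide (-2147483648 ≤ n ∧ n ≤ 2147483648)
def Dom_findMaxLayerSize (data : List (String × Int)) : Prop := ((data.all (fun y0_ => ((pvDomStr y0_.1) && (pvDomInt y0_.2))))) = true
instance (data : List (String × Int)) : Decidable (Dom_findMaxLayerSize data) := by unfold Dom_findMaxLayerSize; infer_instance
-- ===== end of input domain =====

-- B is a simpler two-pass rewrite (distinct layers, then a per-layer rescan and a plain max); return values proved equal on nonempty dicts whose keys contain '_'.

-- ===== PORT A =====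
-- key.split('_')[1]; pyGet? returns none exactly where Python raises IndexError (keys with
-- no '_'), which Pre_ excludes; '.getD ""' is only a junk default outside Pre_.
def pvLayer (k : String) : String :=
  (PySem.List.pyGet? ((PySem.Str.split? k "_").getD []) 1).getD ""

-- loop body of A's 'for key, value in data.items()'
def pvStepA (d : PySem.Dict String Int) (kv : String × Int) : PySem.Dict String Int :=
  let layer := pvLayer kv.1
  if d.contains layer then d.insert layer (d.getD layer 0 + kv.2)
  else d.insert layer kv.2

def findMaxLayerSize (data : List (String × Int)) : Int :=
  let d := data.foldl pvStepA PySem.Dict.empty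
  -- max(layer_sums, key=layer_sums.get); every key is present so .get is getD _ 0
  match PySem.List.max? d.keys (fun k => d.getD k 0) with
  | some m => d.getD m 0
  | none => 0  -- max() on an empty dict raises ValueError; excluded by Pre_

-- ===== PORT B =====
-- Source B's inner generator: sum(value for key, value in data.items() if key.split('_')[1] == layer)
def pvLayerSum (data : List (String × Int)) (l : String) : Int :=
  ((data.filter (fun kv => pvLayer kv.1 == l)).map (fun kv => kv.2)).sum

def findMaxLayerSize_alt (data : List (String × Int)) : Int :=
  let layers : PySem.Set String := PySem.Set.ofList (data.map (fun kv => pvLayer kv.1))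
  match PySem.List.max? (layers.map (fun l => pvLayerSum data l)) (fun x => x) with
  | some m => m
  | none => 0  -- max() of an empty generator raises ValueError; excluded by Pre_

-- ===== PRECONDITION & SPEC =====
-- Pre_ excludes only inputs where Python A raises or that a Python dict cannot represent:
-- the empty dict (max raises ValueError), keys without '_' (split('_')[1] raises IndexError),
-- and lists with duplicate keys (data is a dict in Python, so keys are necessarily distinct).
def Pre_findMaxLayerSize (data : List (String × Int)) : Prop :=
  data ≠ [] ∧ (data.map (fun kv => kv.1)).Nodup ∧
  ∀ kv ∈ data, 2 ≤ ((PySem.Str.split? kv.1 "_").getD []).length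
instance (data : List (String × Int)) : Decidable (Pre_findMaxLayerSize data) := by
  unfold Pre_findMaxLayerSize; infer_instance

def pvWitness_findMaxLayerSize : (List (String × Int)) := [("a_x", 1), ("b_y_2", 2)]

def Spec_findMaxLayerSize (data : List (String × Int)) (out : Int) : Prop := out = findMaxLayerSize_alt data
instance (data : List (String × Int)) (out : Int) : Decidable (Spec_findMaxLayerSize data out) := by unfold Spec_findMaxLayerSize; infer_instance

-- ===== CLAIM (what is proved, stated in full; the proofs are below) =====
def Claim_equal_findMaxLayerSize : Prop := ∀ (data : List (String × Int)), Dom_findMaxLayerSize data → Pre_findMaxLayerSize data → Spec_findMaxLayerSize data (findMaxLayerSize data)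

-- ===== LEMMAS AND PROOFS =====

lemma pvStepA_insert (d : PySem.Dict String Int) (kv : String × Int) :
    pvStepA d kv = d.insert (pvLayer kv.1)
      (if d.contains (pvLayer kv.1) then d.getD (pvLayer kv.1) 0 + kv.2 else kv.2) := by
  unfold pvStepA
  by_cases hc : d.contains (pvLayer kv.1) <;> simp [hc]

lemma pvLayerSum_cons (kv : String × Int) (rest : List (String × Int)) (l : String) :
    pvLayerSum (kv :: rest) l
      = (if pvLayer kv.1 = l then kv.2 else 0) + pvLayerSum rest l := by
  simp only [pvLayerSum, List.filter_cons]
  by_cases h : pvLayer kv.1 = l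
  · simp [h]
  · simp [h]

lemma pvGetD_foldA (data : List (String × Int)) (d : PySem.Dict String Int) (l : String) :
    (data.foldl pvStepA d).getD l 0 = d.getD l 0 + pvLayerSum data l := by
  induction data generalizing d with
  | nil => simp [pvLayerSum]
  | cons kv rest ih =>
    rw [List.foldl_cons, ih, pvLayerSum_cons]
    have hstep : (pvStepA d kv).getD l 0 =
        if pvLayer kv.1 = l then d.getD l 0 + kv.2 else d.getD l 0 := by
      rw [pvStepA_insert, PySem.Dict.getD_insert]
      by_cases h : pvLayer kv.1 = l
      · subst h
        by_cases hc : d.contains (pvLayer kv.1)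
        · simp [hc]
        · have h0 : d.getD (pvLayer kv.1) 0 = 0 :=
            PySem.Dict.getD_of_not_contains d 0 (by simpa using hc)
          simp [hc, h0]
      · rw [if_neg (fun hh : l = pvLayer kv.1 => h hh.symm), if_neg h]
    rw [hstep]
    by_cases h : pvLayer kv.1 = l
    · simp [h]; ring
    · simp [h]

lemma pvKeys_foldA (data : List (String × Int)) :
    (data.foldl pvStepA PySem.Dict.empty).keys
      = PySem.Set.ofList (data.map (fun kv => pvLayer kv.1)) := by
  have he : data.foldl pvStepA PySem.Dict.empty
      = data.foldl (fun d kv => d.insert (pvLayer kv.1)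
          (if d.contains (pvLayer kv.1) then d.getD (pvLayer kv.1) 0 + kv.2 else kv.2))
          PySem.Dict.empty := by
    apply PySem.List.foldl_congr_mem
    intro acc x _; exact pvStepA_insert acc x
  rw [he, PySem.Dict.keys_foldl_insert_key, PySem.Dict.keys_empty]
  rfl

theorem pv_main (data : List (String × Int)) (hne : data ≠ []) :
    findMaxLayerSize data = findMaxLayerSize_alt data := by
  have hkeys : (data.foldl pvStepA PySem.Dict.empty).keys
      = PySem.Set.ofList (data.map (fun kv => pvLayer kv.1)) := pvKeys_foldA data
  have hget : ∀ l, (data.foldl pvStepA PySem.Dict.empty).getD l 0 = pvLayerSum data l := by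
    intro l
    rw [pvGetD_foldA, PySem.Dict.getD_empty]
    ring
  have hmapeq : (data.foldl pvStepA PySem.Dict.empty).keys.map
        (fun k => (data.foldl pvStepA PySem.Dict.empty).getD k 0)
      = (PySem.Set.ofList (data.map (fun kv => pvLayer kv.1))).map (fun l => pvLayerSum data l) := by
    rw [hkeys]
    exact List.map_congr_left (fun l _ => hget l)
  obtain ⟨kv, rest, hcons⟩ : ∃ kv rest, data = kv :: rest := by
    cases data with
    | nil => exact absurd rfl hne
    | cons a b => exact ⟨a, b, rfl⟩
  have hmemL : pvLayer kv.1 ∈ PySem.Set.ofList (data.map (fun kv => pvLayer kv.1)) := by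
    rw [PySem.Set.mem_ofList, hcons]
    exact List.mem_map_of_mem (List.mem_cons_self)
  have hlne : PySem.Set.ofList (data.map (fun kv => pvLayer kv.1)) ≠ [] :=
    List.ne_nil_of_mem hmemL
  have hsne : (PySem.Set.ofList (data.map (fun kv => pvLayer kv.1))).map
      (fun l => pvLayerSum data l) ≠ [] := by simpa using hlne
  have hkne : (data.foldl pvStepA PySem.Dict.empty).keys ≠ [] := by rw [hkeys]; exact hlne
  obtain ⟨m, hm⟩ : ∃ m, PySem.List.max? (data.foldl pvStepA PySem.Dict.empty).keys
      (fun k => (data.foldl pvStepA PySem.Dict.empty).getD k 0) = some m := by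
    rcases h : PySem.List.max? (data.foldl pvStepA PySem.Dict.empty).keys
        (fun k => (data.foldl pvStepA PySem.Dict.empty).getD k 0) with _ | m
    · exact absurd ((PySem.List.max?_eq_none_iff _ _).1 h) hkne
    · exact ⟨m, rfl⟩
  obtain ⟨r, hr⟩ : ∃ r, PySem.List.max? ((PySem.Set.ofList (data.map (fun kv => pvLayer kv.1))).map
      (fun l => pvLayerSum data l)) (fun x => x) = some r := by
    rcases h : PySem.List.max? ((PySem.Set.ofList (data.map (fun kv => pvLayer kv.1))).map
        (fun l => pvLayerSum data l)) (fun x => x) with _ | r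
    · exact absurd ((PySem.List.max?_eq_none_iff _ _).1 h) hsne
    · exact ⟨r, h⟩
  have hA : findMaxLayerSize data = (data.foldl pvStepA PySem.Dict.empty).getD m 0 := by
    simp only [findMaxLayerSize, hm]
  have hB : findMaxLayerSize_alt data = r := by
    simp only [findMaxLayerSize_alt, hr]
  rw [hA, hB]
  have hAmem : (data.foldl pvStepA PySem.Dict.empty).getD m 0
      ∈ (PySem.Set.ofList (data.map (fun kv => pvLayer kv.1))).map (fun l => pvLayerSum data l) := by
    rw [← hmapeq]
    exact List.mem_map_of_mem (PySem.List.max?_mem hm)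
  have hAmax : ∀ x ∈ (PySem.Set.ofList (data.map (fun kv => pvLayer kv.1))).map
      (fun l => pvLayerSum data l), x ≤ (data.foldl pvStepA PySem.Dict.empty).getD m 0 := by
    intro x hx
    rw [← hmapeq] at hx
    obtain ⟨k, hk, rfl⟩ := List.mem_map.1 hx
    exact PySem.List.max?_isMax hm k hk
  have hBmem := PySem.List.max?_mem hr
  have hBmax := PySem.List.max?_isMax hr
  exact le_antisymm (hBmax _ hAmem) (hAmax _ hBmem)

-- ===== VERDICT (by name: the statement is the Claim_ definition above) =====
theorem findMaxLayerSize_spec : Claim_equal_findMaxLayerSize := by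
  intro data _ hpre
  unfold Spec_findMaxLayerSize
  exact pv_main data hpre.1
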